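-- pv_equiv track=rewrite | github.com/sameerasusarla/crossword | bouncy.py | decrease
-- ===== SOURCE A (Python) =====
-- def decrease(num):
--     ls=[]
--     ls1=[]
--     while num>0 :
--         rem = num%10
--         num = num//10
--         ls.append(rem)
--     for i in range(0,len(ls)):
--         ls1.append(ls[i])
--     ls.sort(key=int)
--     if(ls1==ls) :
--         return True
--     else:
--         return False
-- ===== SOURCE B (Python) =====
-- def decrease(num):
--     prev = None
--     while num > 0:
--         rem = num % 10
--         num = num // 10
--         if prev is not None and rem < prev:
--             return False
--         prev = rem
--     return True
-- ===== Notes on version B (the rewrite author's own statement) =====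
-- stated objective: simpler
-- what changed: B replaces A's build-digit-list, copy it, sort it and compare with a single digit-extraction loop that tracks the previous digit and returns False on the first adjacent inversion; no lists are built.
import Mathlib
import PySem

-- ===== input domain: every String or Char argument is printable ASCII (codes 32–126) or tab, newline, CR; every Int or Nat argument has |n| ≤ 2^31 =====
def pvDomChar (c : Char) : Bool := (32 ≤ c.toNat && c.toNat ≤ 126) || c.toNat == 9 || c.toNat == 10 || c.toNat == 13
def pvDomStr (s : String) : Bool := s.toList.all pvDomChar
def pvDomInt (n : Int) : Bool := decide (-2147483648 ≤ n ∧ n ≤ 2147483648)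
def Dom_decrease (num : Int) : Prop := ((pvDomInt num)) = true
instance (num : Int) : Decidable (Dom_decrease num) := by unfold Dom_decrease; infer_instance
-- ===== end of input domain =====

-- B replaces A's build-list/copy/sort/compare with a single digit-extraction scan
-- that tracks the previous digit and fails on the first adjacent inversion  (single pass, early exit, no lists).

theorem pvFloordivTen_toNat_lt (num : Int) (h : 0 < num) :
    (PySem.Int.floordiv num 10).toNat < num.toNat := by
  have h0 : num = ((num.toNat : Nat) : Int) := by omega
  have h1 : PySem.Int.floordiv num 10 = ((num.toNat / 10 : Nat) : Int) := by
    rw [h0]; exact_mod_cast PySem.Int.floordiv_natCast num.toNat 10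
  have h2 : num.toNat / 10 < num.toNat := Nat.div_lt_self (by omega) (by norm_num)
  rw [h1]
  omega

-- ===== PORT A =====
-- the 'while num>0: rem=num%10; num=num//10; ls.append(rem)' loop of A
def decreaseDigits (num : Int) (ls : List Int) : List Int :=
  if h : num > 0 then
    decreaseDigits (PySem.Int.floordiv num 10) (ls ++ [PySem.Int.mod num 10])
  else ls
termination_by num.toNat
decreasing_by exact pvFloordivTen_toNat_lt num h

def decrease (num : Int) : Bool :=
  let ls := decreaseDigits num []
  -- 'for i in range(0,len(ls)): ls1.append(ls[i])'
  let ls1 := (PySem.List.pyRange 0 (ls.length : Int) 1).foldl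
      (fun acc i => acc ++ [PySem.List.pyGetD ls i 0]) []
  -- 'ls.sort(key=int)' (key=int is the identity on ints)
  let lsS := PySem.List.sorted ls (fun x => x) false
  if ls1 = lsS then true else false

-- ===== PORT B =====
-- the 'prev'-tracking digit scan of Source B ('if prev is not None and rem < prev: return False')
def decreaseScan (num : Int) (prev : Option Int) : Bool :=
  if h : num > 0 then
    match prev with
    | some p =>
        if PySem.Int.mod num 10 < p then false
        else decreaseScan (PySem.Int.floordiv num 10) (some (PySem.Int.mod num 10))
    | none => decreaseScan (PySem.Int.floordiv num 10) (some (PySem.Int.mod num 10))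
  else true
termination_by num.toNat
decreasing_by all_goals exact pvFloordivTen_toNat_lt num h

def decrease_alt (num : Int) : Bool := decreaseScan num none

-- ===== PRECONDITION & SPEC =====
def Spec_decrease (num : Int) (out : Bool) : Prop := out = decrease_alt num
instance (num : Int) (out : Bool) : Decidable (Spec_decrease num out) := by unfold Spec_decrease; infer_instance

-- ===== CLAIM (what is proved, stated in full; the proofs are below) =====
def Claim_equal_decrease : Prop := ∀ (num : Int), Dom_decrease num → Spec_decrease num (decrease num)

-- ===== LEMMAS AND PROOFS =====

theorem decreaseDigits_acc : ∀ (num : Int) (ls : List Int),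
    decreaseDigits num ls = ls ++ decreaseDigits num [] := by
  intro num
  induction hn : num.toNat using Nat.strong_induction_on generalizing num with
  | _ n ih =>
    intro ls
    by_cases hp : 0 < num
    · have hlt : (PySem.Int.floordiv num 10).toNat < n := hn ▸ pvFloordivTen_toNat_lt num hp
      rw [decreaseDigits, dif_pos hp]
      conv_rhs => rw [decreaseDigits, dif_pos hp]
      rw [ih _ hlt _ rfl (ls ++ [PySem.Int.mod num 10]),
          ih _ hlt _ rfl ([] ++ [PySem.Int.mod num 10])]
      simp
    · rw [decreaseDigits, dif_neg hp, decreaseDigits, dif_neg hp]; simp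

theorem decreaseDigits_pos (num : Int) (h : 0 < num) :
    decreaseDigits num [] =
      PySem.Int.mod num 10 :: decreaseDigits (PySem.Int.floordiv num 10) [] := by
  rw [decreaseDigits, dif_pos h, decreaseDigits_acc]; simp

theorem decrease_eq (num : Int) :
    decrease num =
      decide (decreaseDigits num [] =
        PySem.List.sorted (decreaseDigits num []) (fun x => x) false) := by
  simp only [decrease]
  rw [PySem.List.foldl_append_singleton_eq_map, List.nil_append,
      show ((decreaseDigits num []).length : Int) = PySem.List.len (decreaseDigits num []) from rfl,
      PySem.List.map_pyGetD_pyRange_zero]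
  split_ifs with h
  · exact (decide_eq_true h).symm
  · exact (decide_eq_false h).symm

theorem eq_sorted_iff_pairwise (l : List Int) :
    (l = PySem.List.sorted l (fun x => x) false) ↔ l.Pairwise (· ≤ ·) := by
  constructor
  · intro h
    have := PySem.List.sorted_pairwise (xs := l) (key := fun x => x)
    rwa [← h] at this
  · intro h
    exact (PySem.List.sorted_eq_self_of_pairwise l (fun x => x) h).symm

theorem decreaseScan_some : ∀ (num p : Int),
    decreaseScan num (some p) = true ↔
      List.IsChain (· ≤ ·) (p :: decreaseDigits num []) := by
  intro num
  induction hn : num.toNat using Nat.strong_induction_on generalizing num with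
  | _ n ih =>
    intro p
    by_cases hp : 0 < num
    · have hlt : (PySem.Int.floordiv num 10).toNat < n := hn ▸ pvFloordivTen_toNat_lt num hp
      rw [decreaseScan, dif_pos hp, decreaseDigits_pos num hp]
      by_cases hc : PySem.Int.mod num 10 < p
      · rw [if_pos hc]
        simp only [Bool.false_eq_true, false_iff, List.isChain_cons_cons]
        rintro ⟨h1, -⟩
        omega
      · rw [if_neg hc, ih _ hlt _ rfl (PySem.Int.mod num 10),
            List.isChain_cons_cons]
        have hple : p ≤ PySem.Int.mod num 10 := by omega
        exact ⟨fun h2 => ⟨hple, h2⟩, fun h2 => h2.2⟩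
    · rw [decreaseScan, dif_neg hp, decreaseDigits, dif_neg hp]
      simp

theorem decrease_alt_iff (num : Int) :
    decrease_alt num = true ↔ List.IsChain (· ≤ ·) (decreaseDigits num []) := by
  unfold decrease_alt
  by_cases hp : 0 < num
  · rw [decreaseScan, dif_pos hp, decreaseDigits_pos num hp]
    exact decreaseScan_some _ _
  · rw [decreaseScan, dif_neg hp, decreaseDigits, dif_neg hp]
    simp

-- ===== VERDICT (by name: the statement is the Claim_ definition above) =====
theorem decrease_spec : Claim_equal_decrease := by
  intro num _
  unfold Spec_decrease
  have h1 : decrease num = true ↔ decrease_alt num = true := by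
    rw [decrease_eq, decrease_alt_iff, decide_eq_true_iff,
        eq_sorted_iff_pairwise, List.isChain_iff_pairwise]
  cases ha : decrease num <;> cases hb : decrease_alt num <;> simp_all
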